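-- pv_equiv track=rewrite | github.com/anum-349/Encryption_Decryption_Algorithm | Decompression_ALGO.py | make_pair
-- ===== SOURCE A (Python) =====
-- def make_pair(text):
--     text = text.lower().replace('j', 'i')
--     pair = []
--     i = 0
--     while i < len(text):
--         if i + 1 == len(text) or text[i] == text[i + 1]:
--             pair.append((text[i], 'x'))
--             i += 1
--         else:
--             pair.append((text[i], text[i + 1]))
--             i += 2
--     return pair
-- ===== SOURCE B (Python) =====
-- def make_pair(text):
--     text = text.lower().replace('j', 'i')
--     pair = []
--     pending = None
--     for c in text:
--         if pending is None:
--             pending = c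
--         elif c == pending:
--             pair.append((pending, 'x'))
--             pending = c
--         else:
--             pair.append((pending, c))
--             pending = None
--     if pending is not None:
--         pair.append((pending, 'x'))
--     return pair
-- ===== Notes on version B (the rewrite author's own statement) =====
-- stated objective: faster
-- what changed: Replaced the index-with-lookahead while loop (steps of 1 or 2 peeking at text[i+1]) by a single for-each scan carrying one 'pending' first-of-pair character, flushed with 'x' at the end; iterating chars directly removes per-step len() calls and repeated indexing.
import Mathlib
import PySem

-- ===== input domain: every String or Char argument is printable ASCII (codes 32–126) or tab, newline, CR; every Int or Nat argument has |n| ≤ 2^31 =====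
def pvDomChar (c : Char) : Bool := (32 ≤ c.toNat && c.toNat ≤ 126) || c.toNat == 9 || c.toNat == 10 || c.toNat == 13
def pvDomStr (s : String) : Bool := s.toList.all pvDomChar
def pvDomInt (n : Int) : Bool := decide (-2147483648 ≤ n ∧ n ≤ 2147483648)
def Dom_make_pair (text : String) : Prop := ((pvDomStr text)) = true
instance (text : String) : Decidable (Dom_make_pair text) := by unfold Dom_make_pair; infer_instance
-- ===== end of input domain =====

-- B replaces A's index-and-lookahead while loop by a single scan carrying a pending
-- first-of-pair character (alternative decomposition; same behaviour, same cost).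

-- shared normalization: text.lower().replace('j', 'i'), as a character list
def pvNorm (text : String) : List Char :=
  (PySem.Str.replace (PySem.Str.lower text) "j" "i").toList

-- ===== PORT A =====
-- the while loop over index i (the nested if mirrors Python's short-circuiting 'or')
def makePairLoopA (l : List Char) (i : Nat) : List (String × String) :=
  if h : i < l.length then
    if h1 : i + 1 = l.length then
      (String.ofList [l[i]], "x") :: makePairLoopA l (i + 1)
    else if l[i] = l[i + 1]'(by omega) then
      (String.ofList [l[i]], "x") :: makePairLoopA l (i + 1)
    else
      (String.ofList [l[i]], String.ofList [l[i + 1]'(by omega)]) :: makePairLoopA l (i + 2)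
  else []
termination_by l.length - i

def make_pair (text : String) : List (String × String) :=
  makePairLoopA (pvNorm text) 0

-- ===== PORT B =====
-- the for-each scan with a pending character; the final flush is the [] / some case
def makePairLoopB : List Char → Option Char → List (String × String)
  | [], none => []
  | [], some p => [(String.ofList [p], "x")]
  | c :: rest, none => makePairLoopB rest (some c)
  | c :: rest, some p =>
    if c = p then (String.ofList [p], "x") :: makePairLoopB rest (some c)
    else (String.ofList [p], String.ofList [c]) :: makePairLoopB rest none

def make_pair_alt (text : String) : List (String × String) :=
  makePairLoopB (pvNorm text) none

-- ===== PRECONDITION & SPEC =====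
def Spec_make_pair (text : String) (out : List (String × String)) : Prop := out = make_pair_alt text
instance (text : String) (out : List (String × String)) : Decidable (Spec_make_pair text out) := by unfold Spec_make_pair; infer_instance

-- ===== CLAIM (what is proved, stated in full; the proofs are below) =====
def Claim_equal_make_pair : Prop := ∀ (text : String), Dom_make_pair text → Spec_make_pair text (make_pair text)

-- ===== LEMMAS AND PROOFS =====

lemma loopA_eq_loopB (l : List Char) (i : Nat) :
    makePairLoopA l i = makePairLoopB (l.drop i) none := by
  induction i using makePairLoopA.induct l with
  | case1 i h h1 ih =>
    rw [makePairLoopA, dif_pos h, dif_pos h1, ih, List.drop_eq_getElem_cons h,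
        List.drop_of_length_le (le_of_eq h1.symm)]
    simp [makePairLoopB]
  | case2 i h h1 h2 ih =>
    rw [makePairLoopA, dif_pos h, dif_neg h1, if_pos h2, ih,
        List.drop_eq_getElem_cons h,
        List.drop_eq_getElem_cons (show i + 1 < l.length by omega)]
    simp only [makePairLoopB]
    rw [if_pos h2.symm, h2]
  | case3 i h h1 h2 ih =>
    rw [makePairLoopA, dif_pos h, dif_neg h1, if_neg h2, ih,
        List.drop_eq_getElem_cons h,
        List.drop_eq_getElem_cons (show i + 1 < l.length by omega)]
    simp only [makePairLoopB]
    rw [if_neg (fun hc => h2 hc.symm)]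
  | case4 i h =>
    rw [makePairLoopA, dif_neg h, List.drop_of_length_le (by omega), makePairLoopB]

-- ===== VERDICT (by name: the statement is the Claim_ definition above) =====
theorem make_pair_spec : Claim_equal_make_pair := by
  intro text _
  unfold Spec_make_pair make_pair make_pair_alt
  simpa using loopA_eq_loopB (pvNorm text) 0
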